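-- pv_equiv track=rewrite | github.com/MuhammedBurakGormus/artificialintelligence | ClassPrecedenceListFinding&FishHooks-HW4.py | hook_for_one_class
-- ===== SOURCE A (Python) =====
-- def pairs(thelist,paired):
--     #this is to make pairs in a given list; for example if we have a list [1,2,3]; this function returns [(1,2),(2,3)]
--     #this takes a list and make pairs from the elements in the list and fill the pairs list with the tuples that contains paired elements
--     while len(thelist) >= 2:
--         paired.append((thelist[0],thelist[1]))
--         thelist.pop(0)
--         pairs(thelist,paired)
--     return paired
--
-- def hook_for_one_class(extracted_edge_list,node,paired):
--     #this take a list containing the connections(edge_list) and a node (and paired for the pairs function which is used in this function)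
--     #it basically creates a hook for the taken node; and it pairs the elements in this hook
--     #for example; we have [(1,2),(1,3),(1,4)]; it first hooks and gets 2,3,4 ; after it adds 1 to the front of 2,3,4; we have 1,2,3,4; then it makes pairs (1,2), (2,3), (3,4)
--     #after this pairing we have paired relations returned as pairs
--     empty_list = []
--     for items in extracted_edge_list:
--         if items[0] == node:
--             empty_list.append(items[1])
--     empty_list.insert(0,node)
--     pairs(empty_list,paired)
--     return paired
-- ===== SOURCE B (Python) =====
-- def hook_for_one_class(extracted_edge_list, node, paired):
--     seq = [node] + [b for a, b in extracted_edge_list if a == node]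
--     paired.extend(zip(seq, seq[1:]))
--     return paired
-- ===== Notes on version B (the rewrite author's own statement) =====
-- stated objective: simpler
-- what changed: Replaces the while-loop + self-recursive, list-consuming pairs() helper (and the incremental neighbor-append loop) with a single comprehension building the hook sequence and one zip over adjacent pairs extended onto paired.
import Mathlib
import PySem

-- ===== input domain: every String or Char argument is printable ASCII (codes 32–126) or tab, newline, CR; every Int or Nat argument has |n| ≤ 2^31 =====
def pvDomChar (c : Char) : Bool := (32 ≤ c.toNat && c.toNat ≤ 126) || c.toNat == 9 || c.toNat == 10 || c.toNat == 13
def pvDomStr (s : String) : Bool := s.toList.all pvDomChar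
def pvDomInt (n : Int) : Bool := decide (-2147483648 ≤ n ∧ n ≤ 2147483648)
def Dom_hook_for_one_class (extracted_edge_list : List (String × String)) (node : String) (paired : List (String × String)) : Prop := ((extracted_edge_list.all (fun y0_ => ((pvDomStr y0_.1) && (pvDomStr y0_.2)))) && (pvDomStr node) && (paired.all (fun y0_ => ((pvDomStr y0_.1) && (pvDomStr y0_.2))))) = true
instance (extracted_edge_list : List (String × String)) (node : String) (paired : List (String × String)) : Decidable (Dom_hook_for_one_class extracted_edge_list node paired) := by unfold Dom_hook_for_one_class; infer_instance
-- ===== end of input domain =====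

-- ===== PORT A =====
-- B changes A's while-loop+recursive pairs helper into one comprehension plus a zip over
-- adjacent pairs, for simplicity; equivalence is about the returned value (A and B both
-- extend the caller's `paired` list in place in Python).
-- `pairs`: the Python while-loop with its inner recursive call, fuel-guarded for totality
-- (fuel = the list length suffices; the guard only makes the same computation total).
def pairsA : Nat → List String → List (String × String) → List String × List (String × String)
  | 0, t, p => (t, p)
  | fuel + 1, t, p =>
    match t with
    | a :: b :: rest =>
        let r := pairsA fuel (b :: rest) (p ++ [(a, b)])
        if r.1.length ≥ 2 then pairsA fuel r.1 r.2 else r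
    | _ => (t, p)

def hook_for_one_class (extracted_edge_list : List (String × String)) (node : String) (paired : List (String × String)) : List (String × String) :=
  let empty_list := extracted_edge_list.foldl
    (fun acc items => if items.1 == node then acc ++ [items.2] else acc) []
  let empty_list := node :: empty_list
  (pairsA empty_list.length empty_list paired).2

-- ===== PORT B =====
def hook_for_one_class_alt (extracted_edge_list : List (String × String)) (node : String) (paired : List (String × String)) : List (String × String) :=
  let seq := node :: extracted_edge_list.filterMap
    (fun ab => if ab.1 == node then some ab.2 else none)
  paired ++ seq.zip seq.tail

-- ===== PRECONDITION & SPEC =====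
def Spec_hook_for_one_class (extracted_edge_list : List (String × String)) (node : String) (paired : List (String × String)) (out : List (String × String)) : Prop := out = hook_for_one_class_alt extracted_edge_list node paired
instance (extracted_edge_list : List (String × String)) (node : String) (paired : List (String × String)) (out : List (String × String)) : Decidable (Spec_hook_for_one_class extracted_edge_list node paired out) := by unfold Spec_hook_for_one_class; infer_instance

-- ===== CLAIM (what is proved, stated in full; the proofs are below) =====
def Claim_equal_hook_for_one_class : Prop := ∀ (extracted_edge_list : List (String × String)) (node : String) (paired : List (String × String)), Dom_hook_for_one_class extracted_edge_list node paired → Spec_hook_for_one_class extracted_edge_list node paired (hook_for_one_class extracted_edge_list node paired)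

-- ===== LEMMAS AND PROOFS =====

lemma pairsA_eq (fuel : Nat) : ∀ (t : List String) (p : List (String × String)),
    t.length ≤ fuel → pairsA fuel t p = (t.drop (t.length - 1), p ++ t.zip t.tail) := by
  induction fuel with
  | zero =>
    intro t p h
    have ht : t = [] := List.eq_nil_of_length_eq_zero (Nat.le_zero.mp h)
    subst ht; simp [pairsA]
  | succ fuel ih =>
    intro t p h
    match t with
    | [] => simp [pairsA]
    | [a] => simp [pairsA]
    | a :: b :: rest =>
      have hlen : (b :: rest).length ≤ fuel := by
        simpa using Nat.succ_le_succ_iff.mp (by simpa using h)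
      have hr := ih (b :: rest) (p ++ [(a, b)]) hlen
      have hdl : ((b :: rest).drop ((b :: rest).length - 1)).length = 1 := by
        simp
      simp only [pairsA, hr]
      rw [if_neg (by omega)]
      simp [List.zip]

lemma hook_eq (extracted_edge_list : List (String × String)) (node : String)
    (paired : List (String × String)) :
    hook_for_one_class extracted_edge_list node paired
      = hook_for_one_class_alt extracted_edge_list node paired := by
  have hfold : ∀ (l : List (String × String)) (acc : List String),
      l.foldl (fun acc items => if items.1 == node then acc ++ [items.2] else acc) acc
        = acc ++ l.filterMap (fun ab => if ab.1 == node then some ab.2 else none) := by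
    intro l
    induction l with
    | nil => simp
    | cons hd tl ih =>
      intro acc
      by_cases h : (hd.1 == node) = true
      · rw [List.foldl_cons, List.filterMap_cons, if_pos h, if_pos h, ih,
          List.append_assoc, List.singleton_append]
      · rw [List.foldl_cons, List.filterMap_cons, if_neg h, if_neg h, ih]
  unfold hook_for_one_class hook_for_one_class_alt
  simp only [hfold, List.nil_append]
  rw [pairsA_eq _ _ _ (Nat.le_refl _)]

-- ===== VERDICT =====
theorem hook_for_one_class_spec : Claim_equal_hook_for_one_class := by
  intro e n p _
  unfold Spec_hook_for_one_class
  exact hook_eq e n p
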